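-- pv_equiv track=rewrite | github.com/gabEKMorais/LTCLegacySystemUpgrade | sketch/V2/extras.py | dividir_string
-- ===== SOURCE A (Python) =====
-- def dividir_string(texto, tamanho_maximo):
--     palavras = texto.split()
--     parte1 = []
--     tamanho_atual = 0
--     for palavra in palavras:
--         if tamanho_atual + len(palavra) + 1 <= tamanho_maximo:
--             parte1.append(palavra)
--             tamanho_atual += len(palavra) + 1  # +1 para incluir o espaço
--         else:
--             break
--     parte1 = ' '.join(parte1)
--     parte2 = ' '.join(palavras[len(parte1.split()):])
--     return parte1, parte2
-- ===== SOURCE B (Python) =====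
-- def dividir_string(texto, tamanho_maximo):
--     palavras = texto.split()
--     # prefix sums: cum[i] = total length of words 0..i, each counted as len(word)+1
--     cum = []
--     total = 0
--     for p in palavras:
--         total += len(p) + 1
--         cum.append(total)
--     # cum is strictly increasing: binary search for the split index
--     # (number of prefix sums <= tamanho_maximo), i.e. bisect_right by hand
--     lo, hi = 0, len(cum)
--     while lo < hi:
--         mid = (lo + hi) // 2
--         if cum[mid] <= tamanho_maximo:
--             lo = mid + 1
--         else:
--             hi = mid
--     return ' '.join(palavras[:lo]), ' '.join(palavras[lo:])
-- ===== Notes on version B (the rewrite author's own statement) =====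
-- stated objective: alternative
-- what changed: Replaces the greedy scan-and-break loop (and the re-split of parte1 to count its words) with a prefix-sum table of cumulative word sizes plus a hand-written bisect_right binary search that computes the split index in one step.
import Mathlib
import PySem

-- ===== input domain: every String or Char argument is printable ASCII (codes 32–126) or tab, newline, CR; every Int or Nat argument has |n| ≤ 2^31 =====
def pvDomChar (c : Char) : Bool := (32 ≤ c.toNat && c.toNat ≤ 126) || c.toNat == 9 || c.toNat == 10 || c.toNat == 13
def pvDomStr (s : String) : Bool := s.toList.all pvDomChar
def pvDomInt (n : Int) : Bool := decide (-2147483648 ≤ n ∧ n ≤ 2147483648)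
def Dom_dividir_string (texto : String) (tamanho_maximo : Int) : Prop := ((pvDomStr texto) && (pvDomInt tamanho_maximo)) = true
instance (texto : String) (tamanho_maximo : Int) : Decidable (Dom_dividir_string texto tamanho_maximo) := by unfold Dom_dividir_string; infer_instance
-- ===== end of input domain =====

-- B replaces A's greedy break loop (and re-split word count) by a prefix-sum table plus a
-- binary search (bisect_right by hand); alternative decomposition, same cost.

-- ===== PORT A =====
-- the 'for palavra in palavras: … break' loop, carrying (parte1, tamanho_atual)
def dividirGoA (M : Int) : List String → List String → Int → List String
  | [], parte1, _ => parte1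
  | palavra :: rest, parte1, tam =>
    if tam + PySem.Str.len palavra + 1 ≤ M then
      dividirGoA M rest (parte1 ++ [palavra]) (tam + PySem.Str.len palavra + 1)
    else parte1

def dividir_string (texto : String) (tamanho_maximo : Int) : String × String :=
  let palavras := PySem.Str.split₀ texto
  let parte1l := dividirGoA tamanho_maximo palavras [] 0
  let parte1 := PySem.Str.join " " parte1l
  let parte2 := PySem.Str.join " "
    (PySem.List.slice palavras (some ((PySem.Str.split₀ parte1).length : Int)) none)
  (parte1, parte2)

-- ===== PORT B =====
-- the prefix-sum loop: cum[i] = running total after word i (each word adds len+1)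
def cumGoB : List String → Int → List Int
  | [], _ => []
  | p :: rest, total => (total + PySem.Str.len p + 1) :: cumGoB rest (total + PySem.Str.len p + 1)

-- the 'while lo < hi' bisect_right loop; mid = (lo+hi)//2 is written inline; cum[mid] is in
-- range whenever read, so getD's default is never used (matches Python's cum[mid] exactly)
def bsearchGoB (cum : List Int) (M : Int) (lo hi : Nat) : Nat :=
  if _h : lo < hi then
    if cum.getD ((lo + hi) / 2) 0 ≤ M then bsearchGoB cum M ((lo + hi) / 2 + 1) hi
    else bsearchGoB cum M lo ((lo + hi) / 2)
  else lo
termination_by hi - lo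
decreasing_by all_goals omega

def dividir_string_alt (texto : String) (tamanho_maximo : Int) : String × String :=
  let palavras := PySem.Str.split₀ texto
  let cum := cumGoB palavras 0
  let lo := bsearchGoB cum tamanho_maximo 0 cum.length
  (PySem.Str.join " " (PySem.List.slice palavras none (some (lo : Int))),
   PySem.Str.join " " (PySem.List.slice palavras (some (lo : Int)) none))

-- ===== PRECONDITION & SPEC =====
def Spec_dividir_string (texto : String) (tamanho_maximo : Int) (out : String × String) : Prop := out = dividir_string_alt texto tamanho_maximo
instance (texto : String) (tamanho_maximo : Int) (out : String × String) : Decidable (Spec_dividir_string texto tamanho_maximo out) := by unfold Spec_dividir_string; infer_instance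

-- ===== CLAIM (what is proved, stated in full; the proofs are below) =====
def Claim_equal_dividir_string : Prop := ∀ (texto : String) (tamanho_maximo : Int), Dom_dividir_string texto tamanho_maximo → Spec_dividir_string texto tamanho_maximo (dividir_string texto tamanho_maximo)

-- ===== LEMMAS AND PROOFS =====

-- the number of words A's greedy loop takes
def gcount (M : Int) : List String → Int → Nat
  | [], _ => 0
  | w :: rest, tam =>
    if tam + PySem.Str.len w + 1 ≤ M then gcount M rest (tam + PySem.Str.len w + 1) + 1 else 0

theorem dividirGoA_eq (M : Int) (ws : List String) (acc : List String) (tam : Int) :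
    dividirGoA M ws acc tam = acc ++ ws.take (gcount M ws tam) := by
  induction ws generalizing acc tam with
  | nil => simp [dividirGoA, gcount]
  | cons w rest ih =>
    simp only [dividirGoA, gcount]
    split_ifs with h
    · rw [ih]; simp
    · simp

theorem gcount_eq_takeWhile (M : Int) (ws : List String) (tam : Int) :
    gcount M ws tam = ((cumGoB ws tam).takeWhile (fun c => decide (c ≤ M))).length := by
  induction ws generalizing tam with
  | nil => simp [gcount, cumGoB]
  | cons w rest ih =>
    simp only [gcount, cumGoB, List.takeWhile_cons, decide_eq_true_eq]
    split_ifs with h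
    · simp [ih]
    · simp

theorem cumGoB_length (ws : List String) (tam : Int) : (cumGoB ws tam).length = ws.length := by
  induction ws generalizing tam with
  | nil => rfl
  | cons w rest ih => simp [cumGoB, ih]

theorem cumGoB_lower (ws : List String) (tam : Int) : ∀ x ∈ cumGoB ws tam, tam < x := by
  induction ws generalizing tam with
  | nil => simp [cumGoB]
  | cons w rest ih =>
    intro x hx
    simp only [cumGoB, List.mem_cons] at hx
    rcases hx with rfl | hx
    · have : (0:Int) ≤ PySem.Str.len w := Int.natCast_nonneg _
      omega
    · have h1 := ih (tam + PySem.Str.len w + 1) x hx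
      have : (0:Int) ≤ PySem.Str.len w := Int.natCast_nonneg _
      omega

theorem cumGoB_pairwise (ws : List String) (tam : Int) : (cumGoB ws tam).Pairwise (· ≤ ·) := by
  induction ws generalizing tam with
  | nil => simp [cumGoB]
  | cons w rest ih =>
    simp only [cumGoB, List.pairwise_cons]
    exact ⟨fun x hx => le_of_lt (cumGoB_lower _ _ x hx), ih _⟩

-- a takeWhile length is the unique r with 'p holds strictly before r and fails at r'
theorem takeWhile_length_unique {α : Type} (p : α → Bool) (c : List α) (r : Nat)
    (hr : r ≤ c.length)
    (h1 : ∀ i (hi : i < c.length), i < r → p (c.get ⟨i, hi⟩) = true)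
    (h2 : ∀ (h : r < c.length), p (c.get ⟨r, h⟩) = false) :
    (c.takeWhile p).length = r := by
  induction c generalizing r with
  | nil => simp only [List.takeWhile_nil, List.length_nil]; simp at hr; omega
  | cons a t ih =>
    cases r with
    | zero =>
      have h0 : p a = false := h2 (by simp)
      simp [h0]
    | succ s =>
      have ha : p a = true := h1 0 (by simp) (Nat.succ_pos s)
      simp only [List.takeWhile_cons, ha, if_true, List.length_cons]
      rw [ih s (by simpa using hr)
        (fun i hi hlt => h1 (i+1) (by simpa using hi) (by omega))
        (fun h => h2 (by simpa using h))]

theorem bsearchGoB_eq (cum : List Int) (M : Int) (hpw : cum.Pairwise (· ≤ ·))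
    (lo hi : Nat) (hhi : hi ≤ cum.length) (hlohi : lo ≤ hi)
    (hlow : ∀ i (h : i < cum.length), i < lo → cum[i] ≤ M)
    (hhigh : ∀ i (h : i < cum.length), hi ≤ i → M < cum[i]) :
    bsearchGoB cum M lo hi = (cum.takeWhile (fun c => decide (c ≤ M))).length := by
  rw [bsearchGoB]
  split_ifs with h hc
  · rw [List.getD_eq_getElem cum 0 (by omega)] at hc
    exact bsearchGoB_eq cum M hpw ((lo + hi) / 2 + 1) hi hhi (by omega)
      (fun i hil hi2 => by
        rcases Nat.lt_or_ge i ((lo + hi) / 2) with h3 | h3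
        · exact le_trans (List.pairwise_iff_getElem.mp hpw i _ hil (by omega) h3) hc
        · have : i = (lo + hi) / 2 := by omega
          subst this; exact hc)
      hhigh
  · rw [List.getD_eq_getElem cum 0 (by omega)] at hc
    rw [not_le] at hc
    exact bsearchGoB_eq cum M hpw lo ((lo + hi) / 2) (by omega) (by omega) hlow
      (fun i hil hi2 => by
        rcases Nat.lt_or_ge ((lo + hi) / 2) i with h3 | h3
        · exact lt_of_lt_of_le hc (List.pairwise_iff_getElem.mp hpw _ i (by omega) hil h3)
        · have : i = (lo + hi) / 2 := by omega
          subst this; exact hc)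
  · have : lo = hi := by omega
    subst this
    exact (takeWhile_length_unique _ cum lo (by omega)
      (fun i hi2 hlt => decide_eq_true (hlow i hi2 hlt))
      (fun h2 => decide_eq_false (not_le.mpr (hhigh lo h2 (le_refl _))))).symm
termination_by hi - lo
decreasing_by all_goals omega

-- ---- words of split₀ are nonempty and whitespace-free; split₀ inverts join ----

def goodWord (w : List Char) : Prop := w ≠ [] ∧ ∀ c ∈ w, PySem.Chars.isspace c = false

theorem split₀_go_good (s : List Char) : ∀ (cur : List Char) (acc : List (List Char)),
    (∀ c ∈ cur, PySem.Chars.isspace c = false) → (∀ w ∈ acc, goodWord w) →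
    ∀ w ∈ PySem.Chars.split₀.go s cur acc, goodWord w := by
  induction s with
  | nil =>
    intro cur acc hcur hacc w hw
    simp only [PySem.Chars.split₀.go] at hw
    split_ifs at hw with he
    · exact hacc w (by simpa using hw)
    · rw [List.mem_reverse, List.mem_cons] at hw
      rcases hw with rfl | hw
      · refine ⟨by simpa [List.isEmpty_iff] using he, ?_⟩
        intro c hc; exact hcur c (by simpa using hc)
      · exact hacc w hw
  | cons c rest ih =>
    intro cur acc hcur hacc w hw
    simp only [PySem.Chars.split₀.go] at hw
    split_ifs at hw with hs he
    · exact ih [] acc (by simp) hacc w hw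
    · refine ih [] (cur.reverse :: acc) (by simp) ?_ w hw
      intro v hv
      rcases List.mem_cons.mp hv with rfl | hv
      · refine ⟨by simpa [List.isEmpty_iff] using he, ?_⟩
        intro d hd; exact hcur d (by simpa using hd)
      · exact hacc v hv
    · refine ih (c :: cur) acc ?_ hacc w hw
      intro d hd
      rcases List.mem_cons.mp hd with rfl | hd
      · exact eq_false_of_ne_true hs
      · exact hcur d hd

theorem split₀_go_word (w : List Char) (hw : ∀ c ∈ w, PySem.Chars.isspace c = false) :
    ∀ (s cur : List Char) (acc : List (List Char)),
    PySem.Chars.split₀.go (w ++ s) cur acc = PySem.Chars.split₀.go s (w.reverse ++ cur) acc := by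
  induction w with
  | nil => intro s cur acc; simp
  | cons c t ih =>
    intro s cur acc
    have hc : PySem.Chars.isspace c = false := hw c (by simp)
    have ht : ∀ d ∈ t, PySem.Chars.isspace d = false := fun d hd => hw d (by simp [hd])
    simp only [List.cons_append, PySem.Chars.split₀.go, hc, Bool.false_eq_true, if_false]
    rw [ih ht s (c :: cur) acc]
    simp

theorem split₀_go_join (ws : List (List Char)) (hws : ∀ w ∈ ws, goodWord w) :
    ∀ acc : List (List Char),
    PySem.Chars.split₀.go (List.intercalate [' '] ws) [] acc = acc.reverse ++ ws := by
  induction ws with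
  | nil => intro acc; simp [List.intercalate, PySem.Chars.split₀.go]
  | cons w rest ih =>
    intro acc
    obtain ⟨hwne, hwns⟩ := hws w (by simp)
    cases rest with
    | nil =>
      have h1 : List.intercalate [' '] [w] = w := by simp [List.intercalate]
      rw [h1, ← List.append_nil w, split₀_go_word w hwns [] [] acc]
      have hne : (w.reverse ++ ([] : List Char)).isEmpty = false := by
        simp [hwne]
      simp only [PySem.Chars.split₀.go, hne, Bool.false_eq_true, if_false]
      simp
    | cons w' rest' =>
      have hint : List.intercalate [' '] (w :: w' :: rest') =
          w ++ ' ' :: List.intercalate [' '] (w' :: rest') := by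
        simp [List.intercalate]
      rw [hint, split₀_go_word w hwns _ [] acc]
      have hsp : PySem.Chars.isspace ' ' = true := by decide
      have hne : (w.reverse ++ ([] : List Char)).isEmpty = false := by
        simp [hwne]
      simp only [PySem.Chars.split₀.go, hsp, if_true, hne, Bool.false_eq_true, if_false]
      rw [ih (fun v hv => hws v (by simp [hv])) _]
      simp

theorem split₀_join (ws : List (List Char)) (hws : ∀ w ∈ ws, goodWord w) :
    PySem.Chars.split₀ (PySem.Chars.join [' '] ws) = ws := by
  unfold PySem.Chars.split₀ PySem.Chars.join
  rw [split₀_go_join ws hws []]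
  simp

theorem str_split₀_toList (texto : String) :
    (PySem.Str.split₀ texto).map String.toList = PySem.Chars.split₀ texto.toList := by
  unfold PySem.Str.split₀
  rw [List.map_map]
  simp [Function.comp_def]

theorem split₀_texto_good (texto : String) :
    ∀ w ∈ PySem.Chars.split₀ texto.toList, goodWord w :=
  split₀_go_good texto.toList [] [] (by simp) (by simp)

-- ' '.join then .split() gives back the word list, when the parts are real words
theorem str_split₀_join (parts : List String)
    (hg : ∀ w ∈ parts.map String.toList, goodWord w) :
    PySem.Str.split₀ (PySem.Str.join " " parts) = parts := by
  show List.map String.ofList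
    (PySem.Chars.split₀ (PySem.Str.join " " parts).toList) = parts
  have h1 : (PySem.Str.join " " parts).toList
      = PySem.Chars.join [' '] (parts.map String.toList) := by
    unfold PySem.Str.join
    simp
  rw [h1, split₀_join _ hg, List.map_map]
  simp [Function.comp_def]

-- ===== VERDICT (by name: the statement is the Claim_ definition above) =====
theorem dividir_string_spec : Claim_equal_dividir_string := by
  intro texto M _
  unfold Spec_dividir_string dividir_string dividir_string_alt
  have hA1 : dividirGoA M (PySem.Str.split₀ texto) [] 0
      = (PySem.Str.split₀ texto).take (gcount M (PySem.Str.split₀ texto) 0) := by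
    rw [dividirGoA_eq]; simp
  have hkle : gcount M (PySem.Str.split₀ texto) 0 ≤ (PySem.Str.split₀ texto).length := by
    rw [gcount_eq_takeWhile M (PySem.Str.split₀ texto) 0]
    calc ((cumGoB (PySem.Str.split₀ texto) 0).takeWhile _).length
        ≤ (cumGoB (PySem.Str.split₀ texto) 0).length := (List.takeWhile_prefix _).length_le
      _ = (PySem.Str.split₀ texto).length := cumGoB_length _ 0
  have hresplit : (PySem.Str.split₀ (PySem.Str.join " "
      ((PySem.Str.split₀ texto).take (gcount M (PySem.Str.split₀ texto) 0)))).length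
      = gcount M (PySem.Str.split₀ texto) 0 := by
    rw [str_split₀_join _ (by
      intro w hw
      rcases List.mem_map.mp hw with ⟨v, hv, rfl⟩
      have hmem : v.toList ∈ (PySem.Str.split₀ texto).map String.toList :=
        List.mem_map.mpr ⟨v, List.mem_of_mem_take hv, rfl⟩
      rw [str_split₀_toList] at hmem
      exact split₀_texto_good texto _ hmem)]
    simp [List.length_take, Nat.min_eq_left hkle]
  have hk : bsearchGoB (cumGoB (PySem.Str.split₀ texto) 0) M 0
      (cumGoB (PySem.Str.split₀ texto) 0).length = gcount M (PySem.Str.split₀ texto) 0 := by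
    rw [bsearchGoB_eq _ M (cumGoB_pairwise _ 0) 0 _ (le_refl _) (Nat.zero_le _)
      (fun i h h0 => by omega) (fun i h hge => by omega)]
    exact (gcount_eq_takeWhile M (PySem.Str.split₀ texto) 0).symm
  simp only [hA1, hresplit, hk, PySem.List.slice_from_natCast, PySem.List.slice_to_natCast]
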